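-- pv_equiv track=rewrite | github.com/ASSERT-KTH/Mokav | experiments/pynguin/c4b/return-lst/generated_tests/src_1903/3/src_1903.py | func
-- ===== SOURCE A (Python) =====
-- def func(*args):
-- 	ret_values = []
--
-- 	input_str = args[0]
-- 	count = 0
-- 	for c in range(0, len(input_str)):
-- 	    if (c == (len(input_str) - 1)):
-- 	        if (count >= 6):
-- 	            ret_values.append('YES')
-- 	            break
-- 	        else:
-- 	            count = 0
-- 	            break
-- 	    if (input_str[c] == input_str[(c + 1)]):
-- 	        count += 1
-- 	    else:
-- 	        if (count >= 6):
-- 	            ret_values.append('YES')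
-- 	            break
-- 	        count = 0
-- 	if (count == 0):
-- 	    ret_values.append('NO')
--
-- 	return ret_values
-- ===== SOURCE B (Python) =====
-- def func(*args):
--     s = args[0]
--     return ['YES'] if any(ch * 7 in s for ch in set(s)) else ['NO']
-- ===== Notes on version B (the rewrite author's own statement) =====
-- stated objective: idiomatic
-- what changed: Replaces the index loop with a manual pair counter, resets and breaks by a substring test: for each distinct character ch, check whether ch*7 occurs in the string.
import Mathlib
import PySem

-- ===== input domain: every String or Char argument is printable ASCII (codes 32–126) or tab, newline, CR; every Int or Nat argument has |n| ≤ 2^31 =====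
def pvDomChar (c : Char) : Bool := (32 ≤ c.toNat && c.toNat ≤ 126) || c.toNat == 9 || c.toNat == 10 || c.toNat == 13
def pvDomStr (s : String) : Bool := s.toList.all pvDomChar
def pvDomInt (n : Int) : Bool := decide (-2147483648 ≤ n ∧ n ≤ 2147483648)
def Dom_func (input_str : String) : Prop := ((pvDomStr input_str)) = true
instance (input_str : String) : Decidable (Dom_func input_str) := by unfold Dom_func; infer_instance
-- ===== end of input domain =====

-- B replaces A's pairwise-equality counter with manual resets/breaks by an idiomatic
-- substring test: some character repeated 7 times occurs in the string.

-- ===== PORT A =====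
-- The for-loop with its breaks, as a recursion over the index c; returns (ret_values, count).
def funcLoop (cs : List Char) (n : Nat) (c : Nat) (count : Int) : List String × Int :=
  if _h : c < n then
    if c = n - 1 then
      if count ≥ 6 then (["YES"], count) else ([], 0)
    else if PySem.List.pyGetD cs (c : Int) ' ' = PySem.List.pyGetD cs ((c : Int) + 1) ' ' then
      funcLoop cs n (c + 1) (count + 1)
    else if count ≥ 6 then (["YES"], count)
    else funcLoop cs n (c + 1) 0
  else ([], count)
  termination_by n - c

def func (input_str : String) : List String :=
  if (funcLoop input_str.toList input_str.toList.length 0 0).2 = 0 then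
    (funcLoop input_str.toList input_str.toList.length 0 0).1 ++ ["NO"]
  else (funcLoop input_str.toList input_str.toList.length 0 0).1

-- ===== PORT B =====
def func_alt (input_str : String) : List String :=
  if (PySem.Set.ofList input_str.toList).any
      (fun ch => PySem.Chars.isIn (List.replicate 7 ch) input_str.toList)
  then ["YES"] else ["NO"]

-- ===== PRECONDITION & SPEC =====
def Spec_func (input_str : String) (out : List String) : Prop := out = func_alt input_str
instance (input_str : String) (out : List String) : Decidable (Spec_func input_str out) := by unfold Spec_func; infer_instance

-- ===== CLAIM (what is proved, stated in full; the proofs are below) =====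
def Claim_equal_func : Prop := ∀ (input_str : String), Dom_func input_str → Spec_func input_str (func input_str)

-- ===== LEMMAS AND PROOFS =====

-- "a run of 7 equal characters starts at index i"
def RunAt (cs : List Char) (i : Nat) : Prop :=
  i + 7 ≤ cs.length ∧ ∀ m, m < 7 → cs.getD (i + m) ' ' = cs.getD i ' '

lemma runAt_iff_infix (cs : List Char) :
    (∃ i, RunAt cs i) ↔ ∃ ch, List.replicate 7 ch <:+: cs := by
  constructor
  · rintro ⟨i, hlen, hrun⟩
    refine ⟨cs.getD i ' ', ?_⟩
    have : List.replicate 7 (cs.getD i ' ') = (cs.drop i).take 7 := by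
      apply List.ext_getElem
      · simp; omega
      · intro m h1 h2
        have hm : m < 7 := by simpa using h1
        have him : i + m < cs.length := by omega
        rw [List.getElem_replicate, List.getElem_take, List.getElem_drop]
        have := hrun m hm
        rw [List.getD_eq_getElem _ _ him] at this
        rw [List.getD_eq_getElem _ _ (by omega : i < cs.length)] at this ⊢
        exact this.symm
    rw [this]
    exact ((cs.drop i).take_prefix 7).isInfix.trans (cs.drop_suffix i).isInfix
  · rintro ⟨ch, pre, post, hsplit⟩
    refine ⟨pre.length, ?_, ?_⟩
    · have := congrArg List.length hsplit
      simp at this; omega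
    · intro m hm
      have hlen : pre.length + 7 ≤ cs.length := by
        have := congrArg List.length hsplit
        simp at this; omega
      have key : ∀ k, k < 7 → cs.getD (pre.length + k) ' ' = ch := by
        intro k hk
        rw [List.getD_eq_getElem _ _ (by omega)]
        have : cs[pre.length + k]'(by omega)
            = (pre ++ (List.replicate 7 ch ++ post))[pre.length + k]'(by rw [← List.append_assoc, hsplit]; omega) := by
          congr 1
          · rw [← List.append_assoc, hsplit]
        rw [this, List.getElem_append_right (by omega)]
        have : pre.length + k - pre.length < (List.replicate 7 ch).length := by simp; omega
        rw [List.getElem_append_left this, List.getElem_replicate]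
      rw [key m hm, show pre.length = pre.length + 0 from rfl, key 0 (by omega)]

-- B returns YES exactly when some run of 7 exists.
lemma alt_yes (s : String) (h : ∃ i, RunAt s.toList i) : func_alt s = ["YES"] := by
  unfold func_alt
  rcases (runAt_iff_infix s.toList).mp h with ⟨ch, hinf⟩
  have hch : ch ∈ s.toList := hinf.subset (by simp)
  have : (PySem.Set.ofList s.toList).any
      (fun ch => PySem.Chars.isIn (List.replicate 7 ch) s.toList) = true := by
    rw [List.any_eq_true]
    exact ⟨ch, (PySem.Set.mem_ofList _ _).mpr hch, (PySem.Chars.isIn_iff_infix _ _).mpr hinf⟩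
  rw [this]; rfl

lemma alt_no (s : String) (h : ¬ ∃ i, RunAt s.toList i) : func_alt s = ["NO"] := by
  unfold func_alt
  have : (PySem.Set.ofList s.toList).any
      (fun ch => PySem.Chars.isIn (List.replicate 7 ch) s.toList) = false := by
    rw [List.any_eq_false]
    intro ch _ hIn
    exact h ((runAt_iff_infix s.toList).mpr ⟨ch, (PySem.Chars.isIn_iff_infix _ _).mp hIn⟩)
  rw [this]; rfl

-- The loop invariant: entering iteration c with counter k, the characters at
-- indices c-k..c are all equal (hreg), the run is maximal on the left (hbd),
-- and no run of 7 lies strictly before it (hpast).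
theorem loop_char (cs : List Char) (c k : Nat) (hc : c < cs.length) (hkc : k ≤ c)
    (hreg : ∀ j, c - k ≤ j → j ≤ c → cs.getD j ' ' = cs.getD c ' ')
    (hbd : k = c ∨ cs.getD (c - k - 1) ' ' ≠ cs.getD (c - k) ' ')
    (hpast : ∀ i, i + 6 < c - k → ¬ RunAt cs i) :
    ((∃ i, c - k ≤ i ∧ RunAt cs i) →
        (funcLoop cs cs.length c (k : Int)).1 = ["YES"] ∧ (funcLoop cs cs.length c (k : Int)).2 ≠ 0)
    ∧ ((¬ ∃ i, c - k ≤ i ∧ RunAt cs i) → funcLoop cs cs.length c (k : Int) = ([], 0)) := by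
  rw [funcLoop, dif_pos hc]
  by_cases hlast : c = cs.length - 1
  · rw [if_pos hlast]
    by_cases h6 : (k : Int) ≥ 6
    · rw [if_pos h6]
      have hrun : RunAt cs (c - 6) := by
        refine ⟨by omega, fun m hm => ?_⟩
        rw [hreg (c - 6 + m) (by omega) (by omega), hreg (c - 6) (by omega) (by omega)]
      constructor
      · intro _; exact ⟨rfl, by simp; omega⟩
      · intro hno; exact absurd ⟨c - 6, by omega, hrun⟩ hno
    · rw [if_neg h6]
      constructor
      · rintro ⟨i, hik, hlen, _⟩; omega
      · intro _; rfl
  · rw [if_neg hlast]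
    have hgd : ∀ (j : Nat), j < cs.length → PySem.List.pyGetD cs (j : Int) ' ' = cs.getD j ' ' := by
      intro j _; simp [PySem.List.pyGetD_natCast]
    by_cases heq : PySem.List.pyGetD cs (c : Int) ' ' = PySem.List.pyGetD cs ((c : Int) + 1) ' '
    · rw [if_pos heq]
      have hc1 : c + 1 < cs.length := by omega
      have heq' : cs.getD c ' ' = cs.getD (c + 1) ' ' := by
        rw [← hgd c hc, ← hgd (c + 1) hc1]; exact_mod_cast heq
      have hreg' : ∀ j, c + 1 - (k + 1) ≤ j → j ≤ c + 1 → cs.getD j ' ' = cs.getD (c + 1) ' ' := by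
        intro j h1 h2
        rcases Nat.lt_or_ge j (c + 1) with h | h
        · rw [hreg j (by omega) (by omega)]; exact heq'
        · have : j = c + 1 := by omega
          rw [this]
      have hbd' : k + 1 = c + 1 ∨ cs.getD (c + 1 - (k + 1) - 1) ' ' ≠ cs.getD (c + 1 - (k + 1)) ' ' := by
        rcases hbd with h | h
        · left; omega
        · right; simpa [show c + 1 - (k + 1) = c - k by omega] using h
      have ih := loop_char cs (c + 1) (k + 1) hc1 (by omega) hreg' hbd'
        (by intro i hi; exact hpast i (by omega))
      have hcast : ((k : Int) + 1) = ((k + 1 : Nat) : Int) := by push_cast; ring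
      rw [hcast]
      have hset : ∀ i, (c - k ≤ i ∧ RunAt cs i) ↔ (c + 1 - (k + 1) ≤ i ∧ RunAt cs i) := by
        intro i; constructor <;> (rintro ⟨h1, h2⟩; exact ⟨by omega, h2⟩)
      constructor
      · intro hex; exact ih.1 (by rcases hex with ⟨i, hi⟩; exact ⟨i, (hset i).mp hi⟩)
      · intro hno; exact ih.2 (by rintro ⟨i, hi⟩; exact hno ⟨i, (hset i).mpr hi⟩)
    · rw [if_neg heq]
      have hc1 : c + 1 < cs.length := by omega
      have hne : cs.getD c ' ' ≠ cs.getD (c + 1) ' ' := by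
        rw [← hgd c hc, ← hgd (c + 1) hc1]
        intro hcontra; exact heq (by exact_mod_cast hcontra)
      by_cases h6 : (k : Int) ≥ 6
      · rw [if_pos h6]
        have hrun : RunAt cs (c - 6) := by
          refine ⟨by omega, fun m hm => ?_⟩
          rw [hreg (c - 6 + m) (by omega) (by omega), hreg (c - 6) (by omega) (by omega)]
        constructor
        · intro _; exact ⟨rfl, by simp; omega⟩
        · intro hno; exact absurd ⟨c - 6, by omega, hrun⟩ hno
      · rw [if_neg h6]
        have hk6 : k < 6 := by omega
        -- no run can touch the current region or the mismatching pair
        have hnotouch : ∀ i, RunAt cs i → c - k ≤ i → c + 1 ≤ i := by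
          rintro i ⟨hlen, hrun⟩ hik
          by_contra hlt
          rcases Nat.lt_or_ge (i + 6) (c + 1) with hin | hcross
          · -- run wholly inside the equal region: forces k ≥ 6
            omega
          · -- run covers the mismatching pair (c, c+1)
            have h1 : cs.getD (i + (c - i)) ' ' = cs.getD i ' ' := hrun (c - i) (by omega)
            have h2 : cs.getD (i + (c + 1 - i)) ' ' = cs.getD i ' ' := hrun (c + 1 - i) (by omega)
            rw [show i + (c - i) = c by omega] at h1
            rw [show i + (c + 1 - i) = c + 1 by omega] at h2
            exact hne (h1.trans h2.symm)
        have hpast' : ∀ i, i + 6 < c + 1 - 0 → ¬ RunAt cs i := by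
          intro i hi hrun
          rcases Nat.lt_or_ge i (c - k) with hlt | hge
          · rcases Nat.lt_or_ge (i + 6) (c - k) with h1 | h2
            · exact hpast i h1 hrun
            · -- run crosses the left boundary of the region
              rcases hbd with hkc' | hbdne
              · omega
              · rcases hrun with ⟨hlen, hrun⟩
                have e1 : cs.getD (i + (c - k - 1 - i)) ' ' = cs.getD i ' ' := hrun (c - k - 1 - i) (by omega)
                have e2 : cs.getD (i + (c - k - i)) ' ' = cs.getD i ' ' := hrun (c - k - i) (by omega)
                rw [show i + (c - k - 1 - i) = c - k - 1 by omega] at e1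
                rw [show i + (c - k - i) = c - k by omega] at e2
                exact hbdne (e1.trans e2.symm)
          · exact absurd (hnotouch i hrun hge) (by omega)
        have ih := loop_char cs (c + 1) 0 hc1 (by omega)
          (by intro j h1 h2; have hj : j = c + 1 := (by omega); exact hj ▸ rfl)
          (by right; simpa [show c + 1 - 0 - 1 = c by omega] using hne)
          hpast'
        have hz : (0 : Int) = ((0 : Nat) : Int) := rfl
        rw [hz]
        constructor
        · rintro ⟨i, hik, hrun⟩
          exact ih.1 ⟨i, by have := hnotouch i hrun hik; omega, hrun⟩
        · intro hno
          exact ih.2 (by rintro ⟨i, _, hrun⟩; exact hno ⟨i, by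
            rcases Nat.lt_or_ge i (c - k) with hlt | hge
            · exact absurd hrun (hpast' i (by omega))
            · exact ⟨hge, hrun⟩⟩)
  termination_by cs.length - c

lemma loop_start (s : String) (hn : 0 < s.toList.length) :
    ((∃ i, RunAt s.toList i) →
        (funcLoop s.toList s.toList.length 0 0).1 = ["YES"] ∧ (funcLoop s.toList s.toList.length 0 0).2 ≠ 0)
    ∧ ((¬ ∃ i, RunAt s.toList i) → funcLoop s.toList s.toList.length 0 0 = ([], 0)) := by
  have h := loop_char s.toList 0 0 (by omega) (by omega)
    (by intro j h1 h2; have hj : j = 0 := (by omega); exact hj ▸ rfl)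
    (by left; rfl) (by intro i hi; omega)
  simp only [show ((0 : Nat) : Int) = 0 from rfl] at h
  constructor
  · intro hex
    exact h.1 (by rcases hex with ⟨i, hi⟩; exact ⟨i, by omega, hi⟩)
  · intro hno
    exact h.2 (by rintro ⟨i, _, hi⟩; exact hno ⟨i, hi⟩)

lemma func_yes (s : String) (hex : ∃ i, RunAt s.toList i) : func s = ["YES"] := by
  have hn : 0 < s.toList.length := by rcases hex with ⟨i, hlen, _⟩; omega
  unfold func
  rcases (loop_start s hn).1 hex with ⟨h1, h2⟩
  rw [if_neg h2, h1]

lemma func_no (s : String) (hex : ¬ ∃ i, RunAt s.toList i) : func s = ["NO"] := by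
  unfold func
  rcases Nat.eq_zero_or_pos s.toList.length with hn | hn
  · rw [funcLoop]; simp [hn]
  · rw [(loop_start s hn).2 hex]; rfl

-- ===== VERDICT (by name: the statement is the Claim_ definition above) =====
theorem func_spec : Claim_equal_func := by
  intro s _
  unfold Spec_func
  by_cases hex : ∃ i, RunAt s.toList i
  · rw [func_yes s hex, alt_yes s hex]
  · rw [func_no s hex, alt_no s hex]
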